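-- pv_equiv track=rewrite | github.com/trangtinkers/TIL | python/n_div_n_minus_one_fac.py | check_problem
-- ===== SOURCE A (Python) =====
-- import math
--
-- def check_problem(n: int) -> list:
--     if n < 2:
--         return []
--     else:
--         res = []
--         for i in range(2, n + 1):
--             k = math.factorial(i - 1)
--             if not (k % i == 0):
--                 res.append(i)
--         return res
-- ===== SOURCE B (Python) =====
-- def _is_prime(i: int) -> bool:
--     d = 2
--     while d * d <= i:
--         if i % d == 0:
--             return False
--         d += 1
--     return True
--
--
-- def check_problem(n: int) -> list:
--     # Wilson's theorem: (i-1)! is not divisible by i exactly for primes i and i == 4.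
--     res = []
--     for i in range(2, n + 1):
--         if i == 4 or _is_prime(i):
--             res.append(i)
--     return res
-- ===== Notes on version B (the rewrite author's own statement) =====
-- stated objective: faster
-- what changed: Replaces the per-element big-integer factorial computation and divisibility test with Wilson's-theorem characterisation: a trial-division primality test plus the special case i == 4.
import Mathlib
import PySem

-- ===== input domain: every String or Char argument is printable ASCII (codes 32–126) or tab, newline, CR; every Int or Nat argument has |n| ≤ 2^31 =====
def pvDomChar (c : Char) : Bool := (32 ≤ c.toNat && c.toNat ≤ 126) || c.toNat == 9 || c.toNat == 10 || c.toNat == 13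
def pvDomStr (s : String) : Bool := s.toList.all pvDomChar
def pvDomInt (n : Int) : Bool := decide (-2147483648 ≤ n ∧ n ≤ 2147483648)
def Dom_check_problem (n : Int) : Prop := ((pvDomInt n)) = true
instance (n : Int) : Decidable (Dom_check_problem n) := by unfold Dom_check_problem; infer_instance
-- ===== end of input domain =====

-- B replaces A's per-element big-integer factorial divisibility test by Wilson's-theorem
-- characterisation (trial-division primality test plus the special case i == 4) — faster.

-- ===== PORT A =====
def check_problem (n : Int) : List Int :=
  if n < 2 then []
  else
    (PySem.List.pyRange 2 (n + 1) 1).foldl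
      (fun res i =>
        -- math.factorial(i - 1): every i in range(2, n+1) has i - 1 ≥ 1, so .toNat is exact here
        let k : Int := ((i - 1).toNat.factorial : Int)
        if ¬ PySem.Int.mod k i = 0 then res ++ [i] else res)
      []

-- ===== PORT B =====
-- needed by isPrimeAux's decreasing_by
theorem int_le_mul_self (d : Int) : d ≤ d * d := by
  by_cases h : d ≤ 0
  · exact le_trans h (mul_self_nonneg d)
  · have h' : 0 < d := by omega
    nlinarith

-- port of _is_prime's while loop: d runs from 2 while d*d ≤ i
def isPrimeAux (i d : Int) : Bool :=
  if h : d * d ≤ i then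
    if PySem.Int.mod i d = 0 then false else isPrimeAux i (d + 1)
  else true
termination_by (i + 1 - d).toNat
decreasing_by
  have hdi : d ≤ i := le_trans (int_le_mul_self d) h
  omega

def check_problem_alt (n : Int) : List Int :=
  (PySem.List.pyRange 2 (n + 1) 1).foldl
    (fun res i => if i = 4 ∨ isPrimeAux i 2 = true then res ++ [i] else res)
    []

-- ===== PRECONDITION & SPEC =====
def Spec_check_problem (n : Int) (out : List Int) : Prop := out = check_problem_alt n
instance (n : Int) (out : List Int) : Decidable (Spec_check_problem n out) := by unfold Spec_check_problem; infer_instance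

-- ===== CLAIM (what is proved, stated in full; the proofs are below) =====
def Claim_equal_check_problem : Prop := ∀ (n : Int), Dom_check_problem n → Spec_check_problem n (check_problem n)

-- ===== LEMMAS AND PROOFS =====

theorem isPrimeAux_iff_fuel : ∀ (fuel : Nat) (i d : Int), (i + 1 - d).toNat ≤ fuel → 1 ≤ d →
    (isPrimeAux i d = true ↔ ∀ e : Int, d ≤ e → e * e ≤ i → ¬ e ∣ i) := by
  intro fuel
  induction fuel with
  | zero =>
    intro i d hf hd
    have hid : i < d := by omega
    have hni : ¬ d * d ≤ i := by
      intro h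
      have : d ≤ i := le_trans (int_le_mul_self d) h
      omega
    rw [isPrimeAux, dif_neg hni]
    constructor
    · intro _ e he hee hdvd
      have hee' : e ≤ e * e := int_le_mul_self e
      linarith
    · intro _; rfl
  | succ m ih =>
    intro i d hf hd
    rw [isPrimeAux]
    by_cases h : d * d ≤ i
    · have hdi : d ≤ i := le_trans (int_le_mul_self d) h
      by_cases hm : PySem.Int.mod i d = 0
      · rw [dif_pos h, if_pos hm]
        simp only [Bool.false_eq_true, false_iff]
        intro hall
        exact hall d le_rfl h ((PySem.Int.mod_eq_zero_iff_dvd i d).mp hm)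
      · rw [dif_pos h, if_neg hm]
        rw [ih i (d + 1) (by omega) (by omega)]
        have hnd : ¬ d ∣ i := fun hdv => hm ((PySem.Int.mod_eq_zero_iff_dvd i d).mpr hdv)
        constructor
        · intro hall e he hee
          rcases eq_or_lt_of_le he with rfl | hlt
          · exact hnd
          · exact hall e (by omega) hee
        · intro hall e he hee
          exact hall e (by omega) hee
    · rw [dif_neg h]
      constructor
      · intro _ e he hee hdvd
        have h1 : 0 ≤ d := by omega
        have h2 : 0 ≤ e := by omega
        have : d * d ≤ e * e := mul_le_mul he he h1 h2
        exact h (le_trans this hee)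
      · intro _; rfl

theorem isPrimeAux_iff' (i d : Int) (hd : 1 ≤ d) :
    (isPrimeAux i d = true ↔ ∀ e : Int, d ≤ e → e * e ≤ i → ¬ e ∣ i) :=
  isPrimeAux_iff_fuel (i + 1 - d).toNat i d le_rfl hd

theorem isPrimeAux_eq_prime (j : Nat) (hj : 2 ≤ j) : isPrimeAux (j : Int) 2 = true ↔ j.Prime := by
  rw [isPrimeAux_iff' (j : Int) 2 (by omega), Nat.prime_def_le_sqrt]
  constructor
  · intro hall
    refine ⟨hj, fun m hm hms => ?_⟩
    have h1 := hall (m : Int) (by exact_mod_cast hm)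
      (by exact_mod_cast Nat.le_sqrt.mp hms)
    intro hdvd
    exact h1 (Int.natCast_dvd_natCast.mpr hdvd)
  · rintro ⟨-, hall⟩ e he hee hdvd
    lift e to ℕ using (by omega : (0:Int) ≤ e) with m
    have h2 : 2 ≤ m := by exact_mod_cast he
    have h3 : m * m ≤ j := by exact_mod_cast hee
    exact hall m h2 (Nat.le_sqrt.mpr h3) (Int.natCast_dvd_natCast.mp hdvd)

theorem not_dvd_fact_of_prime (j : Nat) (hp : j.Prime) : ¬ j ∣ (j - 1).factorial := by
  haveI := Fact.mk hp
  intro hdvd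
  have h0 : (((j - 1).factorial : Nat) : ZMod j) = 0 := (ZMod.natCast_eq_zero_iff _ _).mpr hdvd
  have h1 : (((j - 1).factorial : Nat) : ZMod j) = -1 := ZMod.wilsons_lemma j
  rw [h0] at h1
  have h2 : (1 : ZMod j) = 0 := by rw [← neg_neg (1 : ZMod j), ← h1, neg_zero]
  have h3 : j ∣ 1 := (ZMod.natCast_eq_zero_iff 1 j).mp (by rw [Nat.cast_one]; exact h2)
  have h4 := Nat.le_of_dvd one_pos h3
  have := hp.two_le
  omega

theorem dvd_fact_of_composite (j : Nat) (hj : 2 ≤ j) (hnp : ¬ j.Prime) (h4 : j ≠ 4) :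
    j ∣ (j - 1).factorial := by
  obtain ⟨a, hadvd, ha2, haj⟩ := Nat.exists_dvd_of_not_prime2 hj hnp
  obtain ⟨b, hb⟩ := hadvd
  have hb2 : 2 ≤ b := by
    by_contra hc
    have hc := not_le.mp hc
    interval_cases b
    · rw [mul_zero] at hb; omega
    · rw [mul_one] at hb; omega
  have hbj : b < j := by
    rw [hb]
    calc b < 2 * b := by omega
      _ ≤ a * b := Nat.mul_le_mul ha2 le_rfl
  rcases Nat.lt_trichotomy a b with hab | rfl | hab
  · -- a < b : j = a*b divides b! divides (j-1)!
    have h1 : a ∣ (b - 1).factorial := Nat.dvd_factorial (by omega) (by omega)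
    have h2 : a * b ∣ (b - 1).factorial * b := mul_dvd_mul h1 dvd_rfl
    rw [mul_comm ((b - 1).factorial) b, Nat.mul_factorial_pred (by omega : b ≠ 0)] at h2
    have hj1 : j ∣ b.factorial := by rw [hb]; exact h2
    exact hj1.trans (Nat.factorial_dvd_factorial (by omega : b ≤ j - 1))
  · -- a = b : j = a*a with a ≥ 3; a*a divides (2a)! divides (j-1)!
    have ha3 : 3 ≤ a := by
      by_contra hc
      have hc := not_le.mp hc
      have : a = 2 := by omega
      subst this
      omega
    have h1 : a ∣ (2 * a - 1).factorial := Nat.dvd_factorial (by omega) (by omega)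
    have h2 : a * (2 * a) ∣ (2 * a - 1).factorial * (2 * a) := mul_dvd_mul h1 dvd_rfl
    rw [mul_comm ((2 * a - 1).factorial) (2 * a),
      Nat.mul_factorial_pred (by omega : 2 * a ≠ 0)] at h2
    have h3 : a * a ∣ (2 * a).factorial :=
      dvd_trans (mul_dvd_mul_left a (dvd_mul_left a 2)) h2
    have hle : 2 * a + 1 ≤ j := by rw [hb]; nlinarith
    have hja : j ∣ (2 * a).factorial := by rw [hb]; exact h3
    exact hja.trans (Nat.factorial_dvd_factorial (by omega : 2 * a ≤ j - 1))
  · -- b < a : j = a*b divides a! divides (j-1)!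
    have h1 : b ∣ (a - 1).factorial := Nat.dvd_factorial (by omega) (by omega)
    have h2 : b * a ∣ (a - 1).factorial * a := mul_dvd_mul h1 dvd_rfl
    rw [mul_comm ((a - 1).factorial) a, Nat.mul_factorial_pred (by omega : a ≠ 0)] at h2
    have hj1 : j ∣ a.factorial := by rw [hb, mul_comm]; exact h2
    exact hj1.trans (Nat.factorial_dvd_factorial (by omega : a ≤ j - 1))

theorem fact_mod_iff (j : Nat) (hj : 2 ≤ j) :
    ¬ j ∣ (j - 1).factorial ↔ (j.Prime ∨ j = 4) := by
  constructor
  · intro h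
    by_contra hc
    rw [not_or] at hc
    exact h (dvd_fact_of_composite j hj hc.1 hc.2)
  · rintro (hp | rfl)
    · exact not_dvd_fact_of_prime j hp
    · decide

theorem test_iff (i : Int) (h2 : 2 ≤ i) :
    (¬ PySem.Int.mod (((i - 1).toNat.factorial : Nat) : Int) i = 0) ↔
      (i = 4 ∨ isPrimeAux i 2 = true) := by
  lift i to ℕ using (by omega : (0:Int) ≤ i) with j
  have hj : 2 ≤ j := by exact_mod_cast h2
  have ht : ((j : Int) - 1).toNat = j - 1 := by omega
  rw [ht, PySem.Int.mod_eq_zero_iff_dvd, Int.natCast_dvd_natCast,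
    isPrimeAux_eq_prime j hj, fact_mod_iff j hj]
  have h4 : ((j : Int) = 4) ↔ j = 4 := by exact_mod_cast Iff.rfl
  rw [h4]
  exact or_comm

-- ===== VERDICT (by name: the statement is the Claim_ definition above) =====
theorem check_problem_spec : Claim_equal_check_problem := by
  intro n _
  show check_problem n = check_problem_alt n
  unfold check_problem check_problem_alt
  by_cases h : n < 2
  · rw [if_pos h, PySem.List.pyRange_one_eq_nil (by omega : n + 1 ≤ 2)]
    rfl
  · rw [if_neg h]
    apply PySem.List.foldl_congr_mem
    intro acc x hx
    have hx2 : 2 ≤ x := ((PySem.List.mem_pyRange_one).mp hx).1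
    simp only [test_iff x hx2]
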